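-- pv_equiv track=rewrite | github.com/koLIRcode/Turn_with_a_Compass | main.py | direction
-- ===== SOURCE A (Python) =====
-- def direction(facing, turn):
--     directions_dict = {"N": 0, "NE": 45, "E": 90, "SE": 135, "S": 180, "SW": 225, "W": 270, "NW": 315}
--
--     # перевірка значення "turn" на попадання в заданий проміжок і кратність 45 градусам
--     if turn not in range(-1080, 1081, 45):
--         return "ERROR: input value of 'turn' is too big or not multiple of 45!"
--     else:
--         turn_degrees = directions_dict[facing] + turn
--
--     direction_after_turn = turn_degrees - (turn_degrees // 360) * 360
--     # (turn_degrees // 360) >> визначаємо к-сть кіл в заданих координатах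
--     # * 360 >> к-сть повних кіл
--     # turn_degrees - >> отриманий залишок співпадатиме з градусами зі словнику
--
--     # Визначення напрямку по отриманих значеннях в градусах
--     for k, v in directions_dict.items():
--         if v == direction_after_turn:
--             return k
-- ===== SOURCE B (Python) =====
-- def direction(facing, turn):
--     if turn not in range(-1080, 1081, 45):
--         return "ERROR: input value of 'turn' is too big or not multiple of 45!"
--     cw = {"N": "NE", "NE": "E", "E": "SE", "SE": "S",
--           "S": "SW", "SW": "W", "W": "NW", "NW": "N"}
--     ccw = {v: k for k, v in cw.items()}
--     step = cw if turn > 0 else ccw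
--     d = facing
--     for _ in range(abs(turn) // 45):
--         d = step[d]
--     return d
-- ===== Notes on version B (the rewrite author's own statement) =====
-- stated objective: alternative
-- what changed: Replaces A's degree arithmetic (degree dict, floor-multiply normalization, reverse scan over dict items) with a ring walk: a clockwise successor map (and its inverse for negative turns) applied one 45-degree step at a time, abs(turn)//45 times.
import Mathlib
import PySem

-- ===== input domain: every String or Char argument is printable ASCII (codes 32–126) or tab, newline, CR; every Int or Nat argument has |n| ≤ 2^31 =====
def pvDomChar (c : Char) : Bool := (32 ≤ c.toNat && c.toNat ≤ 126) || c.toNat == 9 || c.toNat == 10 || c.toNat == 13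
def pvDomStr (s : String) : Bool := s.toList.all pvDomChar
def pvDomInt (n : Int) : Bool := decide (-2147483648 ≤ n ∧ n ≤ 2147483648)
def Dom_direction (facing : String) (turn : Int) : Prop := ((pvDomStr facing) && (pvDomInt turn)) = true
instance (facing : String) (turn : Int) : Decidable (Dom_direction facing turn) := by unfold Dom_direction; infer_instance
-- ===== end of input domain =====

-- B walks the compass ring one 45-degree step at a time via a successor map instead of
-- A's degree arithmetic and dict scan; objective: alternative.

-- ===== PORT A =====
def dirErr : String := "ERROR: input value of 'turn' is too big or not multiple of 45!"

def directionsDictA : PySem.Dict String Int :=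
  PySem.Dict.ofList [("N", 0), ("NE", 45), ("E", 90), ("SE", 135), ("S", 180), ("SW", 225), ("W", 270), ("NW", 315)]

def direction (facing : String) (turn : Int) : String :=
  if ¬ (PySem.List.pyRange (-1080) 1081 45).contains turn then
    dirErr
  else
    -- directions_dict[facing]: KeyError (getD default unreachable) on a facing outside the
    -- dict is excluded by Pre_direction
    let turn_degrees := (directionsDictA.get? facing).getD 0 + turn
    let direction_after_turn := turn_degrees - (PySem.Int.floordiv turn_degrees 360) * 360
    -- for k, v in items(): if v == direction_after_turn: return k   (always found; "" unreachable)
    match directionsDictA.items.find? (fun kv => kv.2 == direction_after_turn) with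
    | some kv => kv.1
    | none => ""

-- ===== PORT B =====
def cwDictB : PySem.Dict String String :=
  PySem.Dict.ofList [("N", "NE"), ("NE", "E"), ("E", "SE"), ("SE", "S"),
                     ("S", "SW"), ("SW", "W"), ("W", "NW"), ("NW", "N")]

-- ccw = {v: k for k, v in cw.items()}
def ccwDictB : PySem.Dict String String :=
  PySem.Dict.ofList (cwDictB.items.map (fun kv => (kv.2, kv.1)))

def direction_alt (facing : String) (turn : Int) : String :=
  if ¬ (PySem.List.pyRange (-1080) 1081 45).contains turn then
    dirErr
  else
    let step := if turn > 0 then cwDictB else ccwDictB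
    -- step[d]: KeyError (getD default unreachable) inside Pre_direction
    (List.range (turn.natAbs / 45)).foldl (fun d _ => (step.get? d).getD "") facing

-- ===== PRECONDITION & SPEC =====
-- Pre_ excludes exactly the inputs where A raises KeyError: a valid turn together with a
-- facing that is not one of the eight compass names.
def Pre_direction (facing : String) (turn : Int) : Prop :=
  (PySem.List.pyRange (-1080) 1081 45).contains turn = true →
    facing ∈ ["N", "NE", "E", "SE", "S", "SW", "W", "NW"]
instance (facing : String) (turn : Int) : Decidable (Pre_direction facing turn) := by unfold Pre_direction; infer_instance

def pvWitness_direction : String × Int := ("SW", 90)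

def Spec_direction (facing : String) (turn : Int) (out : String) : Prop := out = direction_alt facing turn
instance (facing : String) (turn : Int) (out : String) : Decidable (Spec_direction facing turn out) := by unfold Spec_direction; infer_instance

-- ===== CLAIM =====
def Claim_equal_direction : Prop := ∀ (facing : String) (turn : Int), Dom_direction facing turn → Pre_direction facing turn → Spec_direction facing turn (direction facing turn)

-- ===== LEMMAS AND PROOFS =====
set_option maxHeartbeats 2000000 in
set_option maxRecDepth 10000 in
theorem direction_eq_on_valid :
    ∀ f ∈ ["N", "NE", "E", "SE", "S", "SW", "W", "NW"],
    ∀ t ∈ PySem.List.pyRange (-1080) 1081 45,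
      direction f t = direction_alt f t := by decide

-- ===== VERDICT =====
theorem direction_spec : Claim_equal_direction := by
  intro f t _ hpre
  unfold Spec_direction
  by_cases h : (PySem.List.pyRange (-1080) 1081 45).contains t = true
  · have hf := hpre h
    have ht : t ∈ PySem.List.pyRange (-1080) 1081 45 := by
      simpa using (List.contains_iff_mem.mp h)
    exact direction_eq_on_valid f hf t ht
  · have hm : t ∉ PySem.List.pyRange (-1080) 1081 45 := by
      intro hmem
      exact h (List.contains_iff_mem.mpr hmem)
    simp [direction, direction_alt, hm]
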